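-- pv_equiv track=rewrite | github.com/soyukke/lean-unsolved | scripts/exploration_ck_verify_recurrence.py | compute_Ck
-- ===== SOURCE A (Python) =====
-- def compute_Ck(vs, k):
--     Ss = [0]
--     for v in vs:
--         Ss.append(Ss[-1] + v)
--     result = 0
--     for i in range(k):
--         result += 3**(k-1-i) * 2**Ss[i]
--     return result
-- ===== SOURCE B (Python) =====
-- def compute_Ck(vs, k):
--     # One pass, no prefix-sum list: Horner accumulator r with a running sum s.
--     r = 0
--     s = 0
--     for i in range(k):
--         r = 3 * r + 2 ** s
--         if i < len(vs):
--             s += vs[i]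
--     return r
-- ===== Notes on version B (the rewrite author's own statement) =====
-- stated objective: alternative
-- what changed: Replaces A's two passes (build a prefix-sum list Ss, then sum independent terms 3**(k-1-i)*2**Ss[i] with a fresh exponentiation of 3 per term) by a single pass that keeps a running prefix sum s and evaluates the same polynomial by Horner's rule r = 3*r + 2**s, building no list and computing no powers of 3.
-- outside the precondition, e.g. on compute_Ck([-1], 2): A returns 3.5, B returns 3.5
import Mathlib
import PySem

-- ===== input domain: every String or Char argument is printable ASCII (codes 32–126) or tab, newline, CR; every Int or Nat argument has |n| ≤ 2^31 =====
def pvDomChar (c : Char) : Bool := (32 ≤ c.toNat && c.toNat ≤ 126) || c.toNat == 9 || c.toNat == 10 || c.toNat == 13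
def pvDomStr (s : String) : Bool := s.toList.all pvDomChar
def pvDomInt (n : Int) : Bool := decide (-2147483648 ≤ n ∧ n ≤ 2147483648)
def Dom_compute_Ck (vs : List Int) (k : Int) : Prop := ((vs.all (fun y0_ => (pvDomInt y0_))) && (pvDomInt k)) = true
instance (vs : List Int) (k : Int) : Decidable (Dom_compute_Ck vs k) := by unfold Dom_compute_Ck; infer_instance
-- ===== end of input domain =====

-- B replaces A's two passes (prefix-sum list, then independent power terms) by one
-- Horner-accumulator pass with a running prefix sum; same value on Pre_ (alternative decomposition).


-- ===== PORT A =====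
-- Python's `**` is ported as `^` with `.toNat` on the exponent; exact under Pre_ (both
-- exponents are nonnegative there).  `Ss[i]` / `Ss[-1]` are PySem.List.pyGetD, in range under Pre_.
def compute_Ck (vs : List Int) (k : Int) : Int :=
  let Ss := vs.foldl (fun acc v => acc ++ [PySem.List.pyGetD acc (-1) 0 + v]) [0]
  (PySem.List.pyRange 0 k 1).foldl
    (fun result i => result + 3 ^ (k - 1 - i).toNat * 2 ^ (PySem.List.pyGetD Ss i 0).toNat) 0

-- ===== PORT B =====
-- `2 ** s` ported as `2 ^ s.toNat` (exact under Pre_, where s stays nonnegative);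
-- `vs[i]` is PySem.List.pyGetD, in range when the branch is taken.
def compute_Ck_alt (vs : List Int) (k : Int) : Int :=
  ((PySem.List.pyRange 0 k 1).foldl
    (fun p i =>
      (3 * p.1 + 2 ^ p.2.toNat,
       if i < (vs.length : Int) then p.2 + PySem.List.pyGetD vs i 0 else p.2))
    ((0 : Int), (0 : Int))).1

-- ===== PRECONDITION & SPEC =====
-- Pre_ excludes k > len(vs)+1, where A raises IndexError, and inputs where some prefix
-- sum Ss[i] with i < k is negative, where A returns a float (2**negative), not an int.
def Pre_compute_Ck (vs : List Int) (k : Int) : Prop :=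
  k ≤ (vs.length : Int) + 1 ∧ ∀ i ∈ List.range k.toNat, 0 ≤ (vs.take i).sum
instance (vs : List Int) (k : Int) : Decidable (Pre_compute_Ck vs k) := by
  unfold Pre_compute_Ck; infer_instance
def pvWitness_compute_Ck : List Int × Int := ([1, 2], 3)

def Spec_compute_Ck (vs : List Int) (k : Int) (out : Int) : Prop := out = compute_Ck_alt vs k
instance (vs : List Int) (k : Int) (out : Int) : Decidable (Spec_compute_Ck vs k out) := by unfold Spec_compute_Ck; infer_instance

-- ===== CLAIM (what is proved, stated in full; the proofs are below) =====
def Claim_equal_compute_Ck : Prop := ∀ (vs : List Int) (k : Int), Dom_compute_Ck vs k → Pre_compute_Ck vs k → Spec_compute_Ck vs k (compute_Ck vs k)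

-- ===== LEMMAS AND PROOFS =====

/-- The prefix-sum list A builds after its first loop, shifted by a start value `s`. -/
def pvScan (s : Int) : List Int → List Int
  | [] => []
  | v :: t => (s + v) :: pvScan (s + v) t

/-- The i-th prefix sum of `vs`. -/
def pvP (vs : List Int) (i : Nat) : Int := (vs.take i).sum

/-- The weight `2 ** Ss[i]` (as the ports compute it). -/
def pvW (vs : List Int) (i : Nat) : Int := 2 ^ (pvP vs i).toNat

/-- The common value of both loops: `∑_{i<n} 3^(n-1-i) * 2^Ss[i]`. -/
def pvSum (vs : List Int) (n : Nat) : Int :=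
  ((List.range n).map (fun j => 3 ^ (n - 1 - j) * pvW vs j)).sum

lemma pvBuild (us : List Int) (acc : List Int) (s : Int)
    (h : PySem.List.pyGetD acc (-1) 0 = s) :
    us.foldl (fun acc v => acc ++ [PySem.List.pyGetD acc (-1) 0 + v]) acc = acc ++ pvScan s us := by
  induction us generalizing acc s with
  | nil => simp [pvScan]
  | cons v t ih =>
      simp only [List.foldl_cons, h, pvScan]
      rw [ih (acc ++ [s + v]) (s + v) (PySem.List.pyGetD_neg_one_append_singleton acc (s + v) 0)]
      simp

lemma pvScan_getD (us : List Int) (s : Int) (j : Nat) (hj : j < us.length) :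
    (pvScan s us).getD j 0 = s + (us.take (j + 1)).sum := by
  induction us generalizing s j with
  | nil => simp at hj
  | cons v t ih =>
      cases j with
      | zero => simp [pvScan]
      | succ j =>
          simp only [pvScan, List.getD_cons_succ, List.take_succ_cons, List.sum_cons]
          rw [ih (s + v) j (by simpa using hj)]
          ring

lemma pvSs_getD (vs : List Int) (j : Nat) (hj : j ≤ vs.length) :
    (0 :: pvScan 0 vs).getD j 0 = pvP vs j := by
  cases j with
  | zero => simp [pvP]
  | succ j =>
      simp only [List.getD_cons_succ]
      rw [pvScan_getD vs 0 j (by omega)]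
      simp [pvP]

lemma pvP_succ (vs : List Int) (j : Nat) (hj : j < vs.length) :
    pvP vs (j + 1) = pvP vs j + vs.getD j 0 := by
  unfold pvP
  rw [List.take_add_one, List.sum_append, List.getElem?_eq_getElem hj]
  simp [List.getD, List.getElem?_eq_getElem hj]

lemma pvSum_succ (vs : List Int) (n : Nat) :
    pvSum vs (n + 1) = 3 * pvSum vs n + pvW vs n := by
  unfold pvSum
  rw [List.range_succ, List.map_append, List.sum_append]
  simp only [List.map_cons, List.map_nil, List.sum_cons, List.sum_nil]
  rw [List.map_congr_left (g := fun j => 3 * (3 ^ (n - 1 - j) * pvW vs j))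
    (by intro j hj
        simp only [List.mem_range] at hj
        have : n + 1 - 1 - j = (n - 1 - j) + 1 := by omega
        rw [this, pow_succ]; ring)]
  have hmul : ((List.range n).map (fun j => 3 * (3 ^ (n - 1 - j) * pvW vs j))).sum
      = 3 * ((List.range n).map (fun j => 3 ^ (n - 1 - j) * pvW vs j)).sum := by
    induction (List.range n) with
    | nil => simp
    | cons x t ih => simp [ih]; ring
  rw [hmul]
  simp [Nat.sub_sub]

lemma pvB_fold (vs : List Int) (n : Nat) (hn : n ≤ vs.length + 1) :
    (List.range n).foldl
      (fun (p : Int × Int) (j : Nat) =>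
        (3 * p.1 + 2 ^ p.2.toNat,
         if (j : Int) < (vs.length : Int) then p.2 + PySem.List.pyGetD vs (j : Int) 0 else p.2))
      (0, 0)
    = (pvSum vs n, pvP vs (min n vs.length)) := by
  induction n with
  | zero => simp [pvSum, pvP]
  | succ n ih =>
      have hn' : n ≤ vs.length := by omega
      rw [List.range_succ, List.foldl_append, ih (by omega)]
      simp only [List.foldl_cons, List.foldl_nil]
      have hmin : min n vs.length = n := by omega
      rw [hmin, pvSum_succ]
      refine Prod.ext rfl ?_
      by_cases h : n < vs.length
      · have : ((n : Int)) < (vs.length : Int) := by exact_mod_cast h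
        simp only [this, if_pos, PySem.List.pyGetD_natCast]
        rw [← pvP_succ vs n h]
        congr 1
        omega
      · have hlen : n = vs.length := by omega
        have : ¬ ((n : Int) < (vs.length : Int)) := by exact_mod_cast h
        simp only [this, reduceIte]
        congr 1
        omega

lemma pvA_eq (vs : List Int) (k : Int) (hk : k ≤ (vs.length : Int) + 1) :
    compute_Ck vs k = pvSum vs k.toNat := by
  unfold compute_Ck
  rw [pvBuild vs [0] 0 (by decide)]
  have hSs : ([0] ++ pvScan 0 vs : List Int) = 0 :: pvScan 0 vs := by simp
  rw [hSs, PySem.List.pyRange_one]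
  simp only [sub_zero, zero_add]
  rw [List.foldl_map, PySem.List.foldl_add]
  rw [List.map_congr_left (g := fun j => 3 ^ (k.toNat - 1 - j) * pvW vs j)
    (by intro j hj
        simp only [List.mem_range] at hj
        have h1 : (k - 1 - (j : Int)).toNat = k.toNat - 1 - j := by omega
        rw [h1, PySem.List.pyGetD_natCast, pvSs_getD vs j (by omega)]
        rfl)]
  simp [pvSum]

lemma pvB_eq (vs : List Int) (k : Int) (hk : k ≤ (vs.length : Int) + 1) :
    compute_Ck_alt vs k = pvSum vs k.toNat := by
  unfold compute_Ck_alt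
  rw [PySem.List.pyRange_one]
  simp only [sub_zero, zero_add]
  rw [List.foldl_map, pvB_fold vs k.toNat (by omega)]

-- ===== VERDICT (by name: the statement is the Claim_ definition above) =====
theorem compute_Ck_spec : Claim_equal_compute_Ck := by
  intro vs k _ hpre
  unfold Spec_compute_Ck
  rw [pvA_eq vs k hpre.1, pvB_eq vs k hpre.1]
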